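-- pv_equiv track=rewrite | github.com/Princeton-LSI-ResearchComputing/tracebase | DataRepo/compositeviews.py | splitCommon
-- ===== SOURCE A (Python) =====
-- def splitCommon(fld_path, reroot_path):
--     """
--     Returns 2 strings: the beginning portion of fld_path that it has in common with the reroot_path and the remainder
--     of the fld_path.
--     """
--     # Initialize the list versions of the supplied paths
--     fld_path_list = []
--     if fld_path != "":
--         fld_path_list = fld_path.split("__")
--     reroot_path_list = []
--     if reroot_path != "":
--         reroot_path_list = reroot_path.split("__")
--
--     # Set loop length to the length of the shorter list
--     length = 0
--     if len(fld_path_list) < len(reroot_path_list):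
--         length = len(fld_path_list)
--     else:
--         length = len(reroot_path_list)
--
--     # Initialize the list versions of the paths to return and assume they start out the same
--     command_path_list = []
--     remaining_path_list = []
--     same = True
--
--     # For the common path positions
--     for i in range(0, length):
--         # If these nodes are the same
--         if fld_path_list[i] == reroot_path_list[i]:
--             command_path_list.append(fld_path_list[i])
--         else:
--             same = False
--             for node in fld_path_list[i:]:
--                 remaining_path_list.append(node)
--             break
--
--     # If the paths were the same, and the field path was longer, finish off the remainder
--     if same and len(fld_path_list) > len(reroot_path_list):
--         for i in range(len(reroot_path_list), len(fld_path_list)):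
--             remaining_path_list.append(fld_path_list[i])
--
--     return "__".join(command_path_list), "__".join(remaining_path_list)
-- ===== SOURCE B (Python) =====
-- def _go(f, r):
--     """f, r are non-empty '__'-delimited paths.
--     Returns (common, remainder) where common is the '__'-joined run of equal
--     leading tokens (None if the very first tokens differ) and remainder is the
--     '__'-joined rest of f."""
--     fi = f.find("__")
--     ri = r.find("__")
--     ftok = f if fi < 0 else f[:fi]
--     rtok = r if ri < 0 else r[:ri]
--     if ftok != rtok:
--         return None, f
--     if fi < 0:
--         return f, ""
--     if ri < 0:
--         return ftok, f[fi + 2:]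
--     c, rem = _go(f[fi + 2:], r[ri + 2:])
--     return (ftok if c is None else ftok + "__" + c), rem
--
--
-- def splitCommon(fld_path, reroot_path):
--     if fld_path == "" or reroot_path == "":
--         return "", fld_path
--     c, rem = _go(fld_path, reroot_path)
--     return ("" if c is None else c), rem
-- ===== Notes on version B (the rewrite author's own statement) =====
-- stated objective: alternative
-- what changed: B never splits the paths into token lists at all: it recurses directly on the two delimited strings, peeling one token per step with str.find('__') and string slicing, assembling the joined common prefix while unwinding and taking the untouched suffix string itself as the remainder, whereas A builds four intermediate lists with three imperative loops and a 'same' flag and re-joins them.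
import Mathlib
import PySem

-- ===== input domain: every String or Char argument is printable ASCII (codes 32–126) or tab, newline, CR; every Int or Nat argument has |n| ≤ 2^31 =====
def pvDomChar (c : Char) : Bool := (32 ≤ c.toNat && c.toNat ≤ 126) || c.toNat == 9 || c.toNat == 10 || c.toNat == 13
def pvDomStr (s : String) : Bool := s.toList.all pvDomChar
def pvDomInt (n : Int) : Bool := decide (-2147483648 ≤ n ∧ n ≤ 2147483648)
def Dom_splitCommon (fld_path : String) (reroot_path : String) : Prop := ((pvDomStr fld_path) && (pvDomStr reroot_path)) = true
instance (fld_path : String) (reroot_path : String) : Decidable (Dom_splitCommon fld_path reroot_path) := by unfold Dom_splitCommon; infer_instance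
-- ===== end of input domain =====

-- B never builds token lists: it recurses on the two delimited strings themselves, peeling one
-- token per step with str.find('__')/slicing and assembling the joined results directly
-- (alternative decomposition, same asymptotic cost).

-- ===== PORT A =====
-- the 'for i in range(0, length)' loop with its break: state (command_path_list, remaining_path_list, same)
def pvALoop (f r : List String) (len : Nat) (i : Nat) (cmd rem : List String) :
    List String × List String × Bool :=
  if i < len then
    if f.getD i "" = r.getD i "" then
      pvALoop f r len (i + 1) (cmd ++ [f.getD i ""]) rem
    else
      -- same = False; for node in fld_path_list[i:]: remaining.append(node); break
      (cmd, rem ++ f.drop i, false)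
  else (cmd, rem, true)
termination_by len - i

def splitCommon (fld_path : String) (reroot_path : String) : String × String :=
  -- s.split("__") with the literal nonempty separator "__" never raises, so split? always returns some
  let fld_path_list := if fld_path ≠ "" then (PySem.Str.split? fld_path "__").getD [] else []
  let reroot_path_list := if reroot_path ≠ "" then (PySem.Str.split? reroot_path "__").getD [] else []
  let length := if fld_path_list.length < reroot_path_list.length
                then fld_path_list.length else reroot_path_list.length
  let res := pvALoop fld_path_list reroot_path_list length 0 [] []
  let remaining_path_list :=
    if res.2.2 = true ∧ fld_path_list.length > reroot_path_list.length then
      -- for i in range(len(reroot_path_list), len(fld_path_list)): remaining.append(fld_path_list[i])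
      (List.range' reroot_path_list.length (fld_path_list.length - reroot_path_list.length)).foldl
        (fun acc i => acc ++ [fld_path_list.getD i ""]) res.2.1
    else res.2.1
  (PySem.Str.join "__" res.1, PySem.Str.join "__" remaining_path_list)

-- ===== PORT B =====
-- the separator "__" as a char list (B's port works on .toList, where PySem defines the string ops)
def pvSep : List Char := ['_', '_']

-- used by the termination proofs: a found separator means the string is nonempty
theorem pvFind_nonneg_ne_nil (f : List Char) (h : ¬ PySem.Chars.find f pvSep < 0) : f ≠ [] := by
  rintro rfl; exact h (by decide)

-- _go(f, r): returns (common or None, remainder), recursing on the delimited strings themselves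
def pvGo (f r : List Char) : Option (List Char) × List Char :=
  let fi := PySem.Chars.find f pvSep
  let ri := PySem.Chars.find r pvSep
  let ftok := if fi < 0 then f else PySem.Chars.slice f none (some fi)
  let rtok := if ri < 0 then r else PySem.Chars.slice r none (some ri)
  if ftok ≠ rtok then (none, f)
  else if hfi : fi < 0 then (some f, [])
  else if ri < 0 then (some ftok, PySem.Chars.slice f (some (fi + 2)) none)
  else
    let res := pvGo (PySem.Chars.slice f (some (fi + 2)) none)
                    (PySem.Chars.slice r (some (ri + 2)) none)
    ((match res.1 with
      | none => some ftok
      | some c => some (ftok ++ pvSep ++ c)), res.2)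
termination_by f.length
decreasing_by
  have hne := pvFind_nonneg_ne_nil f hfi
  have hpos : 0 < f.length := List.length_pos_iff.mpr hne
  have h2 : (0:Int) ≤ PySem.Chars.find f pvSep + 2 := by omega
  simp only [PySem.Chars.slice, PySem.List.slice_from _ h2, List.length_drop]
  omega

def splitCommon_alt (fld_path : String) (reroot_path : String) : String × String :=
  if fld_path = "" ∨ reroot_path = "" then ("", fld_path)
  else
    let res := pvGo fld_path.toList reroot_path.toList
    ((match res.1 with
      | none => ""
      | some c => String.ofList c), String.ofList res.2)

-- ===== PRECONDITION & SPEC =====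
def Spec_splitCommon (fld_path : String) (reroot_path : String) (out : String × String) : Prop := out = splitCommon_alt fld_path reroot_path
instance (fld_path : String) (reroot_path : String) (out : String × String) : Decidable (Spec_splitCommon fld_path reroot_path out) := by unfold Spec_splitCommon; infer_instance

-- ===== CLAIM (what is proved, stated in full; the proofs are below) =====
def Claim_equal_splitCommon : Prop := ∀ (fld_path : String) (reroot_path : String), Dom_splitCommon fld_path reroot_path → Spec_splitCommon fld_path reroot_path (splitCommon fld_path reroot_path)

-- ===== LEMMAS AND PROOFS =====

-- the number of equal leading pairs (used to characterise BOTH programs' results)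
def pvPrefixLen {α : Type} [DecidableEq α] : List (α × α) → Nat
  | [] => 0
  | (a, b) :: t => if a ≠ b then 0 else 1 + pvPrefixLen t

theorem pvPrefixLen_le {α : Type} [DecidableEq α] (f r : List α) :
    pvPrefixLen (f.zip r) ≤ min f.length r.length := by
  induction f generalizing r with
  | nil => simp [pvPrefixLen]
  | cons a f ih =>
    cases r with
    | nil => simp [pvPrefixLen]
    | cons b r =>
      simp only [List.zip_cons_cons, pvPrefixLen]
      split
      · omega
      · have := ih r
        simp only [List.length_cons]
        omega

theorem pvPrefixLen_zip_map {α β : Type} [DecidableEq α] [DecidableEq β]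
    (g : α → β) (hg : Function.Injective g) (f r : List α) :
    pvPrefixLen ((f.map g).zip (r.map g)) = pvPrefixLen (f.zip r) := by
  induction f generalizing r with
  | nil => simp [pvPrefixLen]
  | cons a f ih =>
    cases r with
    | nil => simp [pvPrefixLen]
    | cons b r =>
      simp only [List.map_cons, List.zip_cons_cons, pvPrefixLen, ih r]
      by_cases h : a = b
      · rw [if_neg (by simp [h]), if_neg (by simp [h])]
      · rw [if_pos (hg.ne h), if_pos h]

-- == A-side characterisation (loop = take/drop at the matching-prefix count) ==

theorem pvALoop_eq (f r : List String) : ∀ (i : Nat) (cmd rem : List String),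
    pvALoop f r (min f.length r.length) i cmd rem =
      (cmd ++ (f.drop i).take (pvPrefixLen ((f.drop i).zip (r.drop i))),
       if i + pvPrefixLen ((f.drop i).zip (r.drop i)) < min f.length r.length
       then rem ++ f.drop (i + pvPrefixLen ((f.drop i).zip (r.drop i)))
       else rem,
       decide (¬ (i + pvPrefixLen ((f.drop i).zip (r.drop i)) < min f.length r.length))) := by
  intro i
  induction hm : min f.length r.length - i using Nat.strong_induction_on generalizing i with
  | _ n ih =>
  intro cmd rem
  rw [pvALoop]
  by_cases h : i < min f.length r.length
  · have hf : i < f.length := by omega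
    have hr : i < r.length := by omega
    have hdf : f.drop i = f[i] :: f.drop (i + 1) := (List.getElem_cons_drop hf).symm
    have hdr : r.drop i = r[i] :: r.drop (i + 1) := (List.getElem_cons_drop hr).symm
    have hget : f.getD i "" = f[i] := by
      simp [List.getD, List.getElem?_eq_getElem hf]
    have hget' : r.getD i "" = r[i] := by
      simp [List.getD, List.getElem?_eq_getElem hr]
    rw [if_pos h, hget, hget']
    by_cases heq : f[i] = r[i]
    · rw [if_pos heq, ih (min f.length r.length - (i+1)) (by omega) (i+1) rfl]
      have hki : pvPrefixLen ((f.drop i).zip (r.drop i)) =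
          1 + pvPrefixLen ((f.drop (i+1)).zip (r.drop (i+1))) := by
        rw [hdf, hdr, List.zip_cons_cons]
        simp only [pvPrefixLen]
        rw [if_neg (by simp [heq])]
      have harith : i + (1 + pvPrefixLen ((f.drop (i+1)).zip (r.drop (i+1)))) =
          (i + 1) + pvPrefixLen ((f.drop (i+1)).zip (r.drop (i+1))) := by omega
      rw [hki, harith]
      refine Prod.ext ?_ rfl
      rw [hdf, Nat.add_comm 1, List.take_succ_cons]
      simp
    · rw [if_neg heq]
      have hki0 : pvPrefixLen ((f.drop i).zip (r.drop i)) = 0 := by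
        rw [hdf, hdr, List.zip_cons_cons]
        simp only [pvPrefixLen]
        rw [if_pos heq]
      rw [hki0]
      have hd : decide (¬ (i + 0 < min f.length r.length)) = false :=
        decide_eq_false (by omega)
      rw [hd, Nat.add_zero, if_pos h]
      simp
  · rw [if_neg h]
    have hk0 : (f.drop i).zip (r.drop i) = [] := by
      rcases Nat.lt_or_ge i f.length with hlt | hge
      · have : r.drop i = [] := List.drop_eq_nil_of_le (by omega)
        simp [this]
      · have : f.drop i = [] := List.drop_eq_nil_of_le (by omega)
        simp [this]
    rw [hk0]
    have hd : decide (¬ (i + pvPrefixLen ([] : List (String × String)) < min f.length r.length)) = true :=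
      decide_eq_true (by simp [pvPrefixLen]; omega)
    rw [hd]
    simp [pvPrefixLen, h]

theorem splitCommon_join_eq (f r : List String) :
    ((pvALoop f r (if f.length < r.length then f.length else r.length) 0 [] []).1,
     if (pvALoop f r (if f.length < r.length then f.length else r.length) 0 [] []).2.2 = true
        ∧ f.length > r.length then
       (List.range' r.length (f.length - r.length)).foldl
         (fun acc i => acc ++ [f.getD i ""])
         (pvALoop f r (if f.length < r.length then f.length else r.length) 0 [] []).2.1
     else (pvALoop f r (if f.length < r.length then f.length else r.length) 0 [] []).2.1) =
    (f.take (pvPrefixLen (f.zip r)), f.drop (pvPrefixLen (f.zip r))) := by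
  have hlen : (if f.length < r.length then f.length else r.length) = min f.length r.length := by
    split <;> omega
  have hrange : ∀ (n a : Nat) (rem : List String), a + n ≤ f.length →
      (List.range' a n).foldl (fun acc i => acc ++ [f.getD i ""]) rem
        = rem ++ (f.drop a).take n := by
    intro n
    induction n with
    | zero => intro a rem _; simp
    | succ n ih =>
      intro a rem hle
      have ha : a < f.length := by omega
      rw [List.range'_succ, List.foldl_cons, ih (a+1) _ (by omega)]
      have hda : f.drop a = f[a] :: f.drop (a + 1) := (List.getElem_cons_drop ha).symm
      rw [hda, List.take_succ_cons]
      simp [List.getD, List.getElem?_eq_getElem ha]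
  rw [hlen]
  have hloop := pvALoop_eq f r 0 [] []
  simp only [List.drop_zero, Nat.zero_add, List.nil_append] at hloop
  rw [hloop]
  dsimp only
  have hkle := pvPrefixLen_le f r
  by_cases hlt : pvPrefixLen (f.zip r) < min f.length r.length
  · have h1 : decide (¬ pvPrefixLen (f.zip r) < min f.length r.length) = false :=
      decide_eq_false (not_not_intro hlt)
    rw [h1, if_neg (by simp), if_pos hlt]
  · have h1 : decide (¬ pvPrefixLen (f.zip r) < min f.length r.length) = true :=
      decide_eq_true hlt
    rw [h1, if_neg hlt]
    by_cases hgt : f.length > r.length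
    · have hkr : pvPrefixLen (f.zip r) = r.length := by omega
      rw [if_pos ⟨rfl, hgt⟩, hrange (f.length - r.length) r.length [] (by omega)]
      have hdt : (f.drop r.length).take (f.length - r.length) = f.drop r.length :=
        List.take_of_length_le (le_of_eq (List.length_drop))
      rw [hdt, hkr]
      simp
    · have hkf : pvPrefixLen (f.zip r) = f.length := by omega
      rw [if_neg (fun hc => hgt hc.2)]
      rw [hkf, List.drop_length]

-- == find facts ==

theorem pvFindGo_nonneg (sub : List Char) : ∀ (l : List Char) (k : Nat),
    PySem.Chars.find.go sub l k = -1 ∨ (k : Int) ≤ PySem.Chars.find.go sub l k := by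
  intro l
  induction l with
  | nil =>
    intro k
    rw [PySem.Chars.find.go]
    split <;> simp
  | cons c t ih =>
    intro k
    rw [PySem.Chars.find.go]
    split
    · right; simp
    · rcases ih (k + 1) with h | h
      · left; exact h
      · right
        push_cast at h ⊢
        omega

theorem pvFind_cases (l : List Char) :
    PySem.Chars.find l pvSep = -1 ∨ 0 ≤ PySem.Chars.find l pvSep := by
  have h : PySem.Chars.find l pvSep = PySem.Chars.find.go pvSep l 0 := rfl
  rw [h]
  rcases pvFindGo_nonneg pvSep l 0 with h' | h'
  · exact Or.inl h'
  · exact Or.inr (by simpa using h')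

theorem pvFindGo_shift (sub : List Char) : ∀ (l : List Char) (k : Nat),
    PySem.Chars.find.go sub l k =
      if PySem.Chars.find.go sub l 0 = -1 then -1 else PySem.Chars.find.go sub l 0 + k := by
  intro l
  induction l with
  | nil =>
    intro k
    rw [PySem.Chars.find.go, PySem.Chars.find.go]
    split <;> simp
  | cons c t ih =>
    intro k
    rw [PySem.Chars.find.go]
    conv_rhs => rw [PySem.Chars.find.go]
    split
    · simp
    · rw [ih (k + 1)]
      simp only [Nat.zero_add]
      rw [ih 1]
      by_cases h0 : PySem.Chars.find.go sub t 0 = -1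
      · simp [h0]
      · have hge : (0:Int) ≤ PySem.Chars.find.go sub t 0 := by
          rcases pvFindGo_nonneg sub t 0 with h | h
          · exact absurd h h0
          · simpa using h
        have hne1 : ¬ PySem.Chars.find.go sub t 0 + ((1:Nat) : Int) = -1 := by push_cast; omega
        rw [if_neg h0, if_neg h0, if_neg hne1]
        push_cast
        ring

theorem pvFind_nil : PySem.Chars.find ([] : List Char) pvSep = -1 := by decide

theorem pvFind_prefix (s sub : List Char) (h : PySem.Chars.find s sub ≠ -1) :
    sub <+: List.drop (PySem.Chars.find s sub).toNat s := by
  have := PySem.Chars.findFrom_natCast_spec s sub 0 (by simp)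
    (by simpa [PySem.Chars.findFrom_zero] using h)
  simpa [PySem.Chars.findFrom_zero] using this.2.1

-- == the token-list view of a '__'-delimited string, driven by find (shape of B's recursion) ==

def pvTok (l : List Char) : List (List Char) :=
  if h : PySem.Chars.find l pvSep = -1 then [l]
  else l.take (PySem.Chars.find l pvSep).toNat ::
       pvTok (l.drop ((PySem.Chars.find l pvSep).toNat + 2))
termination_by l.length
decreasing_by
  have hge : 0 ≤ PySem.Chars.find l pvSep := by
    rcases pvFind_cases l with h' | h'
    · exact absurd h' h
    · exact h'
  have hne : l ≠ [] := pvFind_nonneg_ne_nil l (by omega)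
  have hpos : 0 < l.length := List.length_pos_iff.mpr hne
  simp only [List.length_drop]
  omega

theorem pvTok_cons (l : List Char) : ∃ x xs, pvTok l = x :: xs := by
  rw [pvTok]
  split
  · exact ⟨l, [], rfl⟩
  · exact ⟨_, _, rfl⟩

-- splitOn.go produces exactly the pvTok tokens (first token prefixed by the scanned chars)
theorem pvSplitGo_eq_pvTok : ∀ (n : Nat) (l : List Char), l.length ≤ n →
    ∀ (cur : List Char) (acc : List (List Char)) (fuel : Nat), l.length < fuel →
    PySem.Chars.splitOn.go pvSep fuel l cur acc =
      acc.reverse ++ (match pvTok l with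
        | [] => []
        | t :: ts => (cur.reverse ++ t) :: ts) := by
  intro n
  induction n using Nat.strong_induction_on with
  | _ n ih =>
  intro l hln cur acc fuel hfuel
  obtain ⟨m, rfl⟩ : ∃ m, fuel = m + 1 := ⟨fuel - 1, by omega⟩
  cases l with
  | nil =>
    rw [PySem.Chars.splitOn.go.eq_def, pvTok]
    rw [dif_pos pvFind_nil]
    simp
  | cons c rest =>
    have hln' : rest.length + 1 ≤ n := by simpa using hln
    have hfuel' : rest.length + 1 < m + 1 := by simpa using hfuel
    rw [PySem.Chars.splitOn.go.eq_def]
    simp only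
    by_cases hp : pvSep.isPrefixOf (c :: rest)
    · rw [if_pos hp]
      have hfind : PySem.Chars.find (c :: rest) pvSep = 0 := by
        have h : PySem.Chars.find (c :: rest) pvSep =
            PySem.Chars.find.go pvSep (c :: rest) 0 := rfl
        rw [h, PySem.Chars.find.go, if_pos hp]
        simp
      set l' := (c :: rest).drop pvSep.length with hl'
      have hlen' : l'.length ≤ rest.length := by
        simp only [hl', List.length_drop, List.length_cons]
        have : pvSep.length = 2 := by decide
        omega
      rw [ih rest.length (by omega) l' (by omega) [] (cur.reverse :: acc) m (by omega)]
      have htok : pvTok (c :: rest) = [] :: pvTok l' := by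
        rw [pvTok, dif_neg (by rw [hfind]; decide)]
        rw [hfind]
        simp only [Int.toNat_zero, List.take_zero, Nat.zero_add]
        rfl
      rw [htok]
      rcases pvTok_cons l' with ⟨x, xs, hx⟩
      rw [hx]
      simp
    · rw [if_neg hp]
      have hfind : PySem.Chars.find (c :: rest) pvSep =
          if PySem.Chars.find rest pvSep = -1 then -1
          else PySem.Chars.find rest pvSep + 1 := by
        have h : PySem.Chars.find (c :: rest) pvSep =
            PySem.Chars.find.go pvSep (c :: rest) 0 := rfl
        rw [h, PySem.Chars.find.go, if_neg hp]
        simp only [Nat.zero_add]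
        rw [pvFindGo_shift pvSep rest 1]
        have h2 : PySem.Chars.find rest pvSep = PySem.Chars.find.go pvSep rest 0 := rfl
        rw [h2]
        split <;> simp
      rw [ih rest.length (by omega) rest le_rfl (c :: cur) acc m (by omega)]
      by_cases h0 : PySem.Chars.find rest pvSep = -1
      · have htokr : pvTok rest = [rest] := by rw [pvTok, dif_pos h0]
        have htokl : pvTok (c :: rest) = [c :: rest] := by
          rw [pvTok, dif_pos (by rw [hfind, if_pos h0])]
        rw [htokr, htokl]
        simp
      · have hge : 0 ≤ PySem.Chars.find rest pvSep := by
          rcases pvFind_cases rest with h' | h'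
          · exact absurd h' h0
          · exact h'
        have hfind' : PySem.Chars.find (c :: rest) pvSep =
            PySem.Chars.find rest pvSep + 1 := by rw [hfind, if_neg h0]
        have htokr : pvTok rest = rest.take (PySem.Chars.find rest pvSep).toNat ::
            pvTok (rest.drop ((PySem.Chars.find rest pvSep).toNat + 2)) := by
          rw [pvTok, dif_neg h0]
        have htokl : pvTok (c :: rest) = (c :: rest.take (PySem.Chars.find rest pvSep).toNat) ::
            pvTok (rest.drop ((PySem.Chars.find rest pvSep).toNat + 2)) := by
          rw [pvTok, dif_neg (by rw [hfind']; omega)]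
          rw [hfind']
          have ht : (PySem.Chars.find rest pvSep + 1).toNat =
              (PySem.Chars.find rest pvSep).toNat + 1 := by omega
          rw [ht, List.take_succ_cons]
          have hd : (PySem.Chars.find rest pvSep).toNat + 1 + 2 =
              ((PySem.Chars.find rest pvSep).toNat + 2) + 1 := by omega
          rw [hd, List.drop_succ_cons]
        rw [htokr, htokl]
        simp

theorem pvSplitOn_eq_pvTok (l : List Char) :
    PySem.Chars.splitOn l pvSep = pvTok l := by
  have h : PySem.Chars.splitOn l pvSep =
      PySem.Chars.splitOn.go pvSep (l.length + 1) l [] [] := rfl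
  rw [h, pvSplitGo_eq_pvTok l.length l le_rfl [] [] (l.length + 1) (by omega)]
  rcases pvTok_cons l with ⟨x, xs, hx⟩
  rw [hx]
  simp

-- joining the tokens gives the string back
theorem pvJoin_pvTok : ∀ (n : Nat) (l : List Char), l.length ≤ n →
    PySem.Chars.join pvSep (pvTok l) = l := by
  intro n
  induction n using Nat.strong_induction_on with
  | _ n ih =>
  intro l hln
  rw [pvTok]
  by_cases hf : PySem.Chars.find l pvSep = -1
  · rw [dif_pos hf, PySem.Chars.join_singleton]
  · rw [dif_neg hf]
    have hge : 0 ≤ PySem.Chars.find l pvSep := by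
      rcases pvFind_cases l with h' | h'
      · exact absurd h' hf
      · exact h'
    have hlne : l ≠ [] := pvFind_nonneg_ne_nil l (by omega)
    have hlpos : 0 < l.length := List.length_pos_iff.mpr hlne
    set i : Nat := (PySem.Chars.find l pvSep).toNat with hi
    set l' := l.drop (i + 2) with hl'
    have hlen' : l'.length < l.length := by
      simp only [hl', List.length_drop]; omega
    rcases pvTok_cons l' with ⟨x, xs, hx⟩
    have hjoin : PySem.Chars.join pvSep (l.take i :: pvTok l') =
        l.take i ++ pvSep ++ PySem.Chars.join pvSep (pvTok l') := by
      rw [hx, PySem.Chars.join_cons_cons]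
    rw [hjoin, ih l'.length (by omega) l' le_rfl]
    have hpre := pvFind_prefix l pvSep hf
    rw [← hi] at hpre
    obtain ⟨t, ht⟩ := hpre
    have hsl : pvSep.length = 2 := by decide
    have ht' : t = l' := by
      rw [hl']
      have h1 : t = (pvSep ++ t).drop pvSep.length := (List.drop_left (l₁ := pvSep)).symm
      rw [h1, ht, List.drop_drop, hsl]
    have hdrop : l.drop i = pvSep ++ l' := by rw [← ht, ht']
    calc l.take i ++ pvSep ++ l'
        = l.take i ++ (pvSep ++ l') := by rw [List.append_assoc]
      _ = l.take i ++ l.drop i := by rw [hdrop]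
      _ = l := List.take_append_drop i l

-- == B-side characterisation: pvGo = (joined common token prefix | none, joined remainder) ==

theorem pvGo_char : ∀ (n : Nat) (f r : List Char), f.length ≤ n →
    pvGo f r =
      ((if pvPrefixLen ((pvTok f).zip (pvTok r)) = 0 then none
        else some (PySem.Chars.join pvSep
          ((pvTok f).take (pvPrefixLen ((pvTok f).zip (pvTok r)))))),
       PySem.Chars.join pvSep
         ((pvTok f).drop (pvPrefixLen ((pvTok f).zip (pvTok r))))) := by
  intro n
  induction n using Nat.strong_induction_on with
  | _ n ih =>
  intro f r hln
  rw [pvGo]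
  simp only [PySem.Chars.slice]
  have hslice : ∀ (s : List Char), ¬ PySem.Chars.find s pvSep < 0 →
      PySem.List.slice s none (some (PySem.Chars.find s pvSep)) =
        s.take (PySem.Chars.find s pvSep).toNat := by
    intro s hs
    exact PySem.List.slice_to s (by omega)
  -- the head token of a string, as pvGo computes it
  have hheadf : ∀ (s : List Char), ∃ tl, pvTok s =
      (if PySem.Chars.find s pvSep < 0 then s
       else PySem.List.slice s none (some (PySem.Chars.find s pvSep))) :: tl := by
    intro s
    rcases pvFind_cases s with h' | h'
    · refine ⟨[], ?_⟩
      rw [pvTok, dif_pos h', if_pos (by omega)]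
    · refine ⟨pvTok (s.drop ((PySem.Chars.find s pvSep).toNat + 2)), ?_⟩
      rw [pvTok, dif_neg (by omega), if_neg (by omega), hslice s (by omega)]
  obtain ⟨tf, htf⟩ := hheadf f
  obtain ⟨tr, htr⟩ := hheadf r
  by_cases hne : (if PySem.Chars.find f pvSep < 0 then f
       else PySem.List.slice f none (some (PySem.Chars.find f pvSep))) ≠
      (if PySem.Chars.find r pvSep < 0 then r
       else PySem.List.slice r none (some (PySem.Chars.find r pvSep)))
  · -- first tokens differ: k = 0
    rw [if_pos hne]
    have hk : pvPrefixLen ((pvTok f).zip (pvTok r)) = 0 := by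
      rw [htf, htr, List.zip_cons_cons]
      simp only [pvPrefixLen]
      rw [if_pos hne]
    rw [hk]
    rw [if_pos rfl, List.drop_zero, pvJoin_pvTok f.length f le_rfl]
  · rw [if_neg hne]
    rw [not_ne_iff] at hne
    by_cases hfi : PySem.Chars.find f pvSep < 0
    · -- fld has a single token equal to reroot's first token
      rw [dif_pos hfi]
      have hf1 : PySem.Chars.find f pvSep = -1 := by
        rcases pvFind_cases f with h' | h'
        · exact h'
        · omega
      have htok : pvTok f = [f] := by rw [pvTok, dif_pos hf1]
      have hk : pvPrefixLen ((pvTok f).zip (pvTok r)) = 1 := by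
        rw [htok, htr, List.zip_cons_cons, List.zip_nil_left]
        simp only [pvPrefixLen]
        rw [if_neg (by rw [if_pos hfi] at hne; simpa using hne)]
      rw [hk, if_neg one_ne_zero, htok, Prod.mk.injEq]
      constructor
      · simp [PySem.Chars.join_singleton]
      · simp [PySem.Chars.join_nil]
    · rw [dif_neg hfi]
      have hgef : 0 ≤ PySem.Chars.find f pvSep := by omega
      have hf1 : PySem.Chars.find f pvSep ≠ -1 := by omega
      have htokf : pvTok f = f.take (PySem.Chars.find f pvSep).toNat ::
          pvTok (f.drop ((PySem.Chars.find f pvSep).toNat + 2)) := by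
        rw [pvTok, dif_neg hf1]
      have hslf : PySem.List.slice f (some (PySem.Chars.find f pvSep + 2)) =
          f.drop ((PySem.Chars.find f pvSep).toNat + 2) := by
        rw [PySem.List.slice_from f (by omega : (0:Int) ≤ PySem.Chars.find f pvSep + 2)]
        congr 1
        omega
      by_cases hri : PySem.Chars.find r pvSep < 0
      · -- reroot has a single token equal to fld's first token
        rw [if_pos hri]
        have hr1 : PySem.Chars.find r pvSep = -1 := by
          rcases pvFind_cases r with h' | h'
          · exact h'
          · omega
        have htokr : pvTok r = [r] := by rw [pvTok, dif_pos hr1]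
        have hk : pvPrefixLen ((pvTok f).zip (pvTok r)) = 1 := by
          rw [htokf, htokr, List.zip_cons_cons, List.zip_nil_right]
          simp only [pvPrefixLen]
          rw [if_neg ?hc]
          case hc =>
            rw [if_neg hfi, if_pos hri, hslice f hfi] at hne
            simpa using hne
        rw [hk, if_neg one_ne_zero, htokf, Prod.mk.injEq]
        constructor
        · rw [hslice f hfi]
          have ht1 : ∀ (a : List Char) (l : List (List Char)), (a :: l).take 1 = [a] :=
            fun a l => rfl
          rw [ht1, PySem.Chars.join_singleton, if_neg hfi]
        · rw [hslf, List.drop_one, List.tail_cons]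
          exact (pvJoin_pvTok (f.drop ((PySem.Chars.find f pvSep).toNat + 2)).length _ le_rfl).symm
      · -- both strings still carry a separator: recurse
        rw [if_neg hri]
        have hger : 0 ≤ PySem.Chars.find r pvSep := by omega
        have hr1 : PySem.Chars.find r pvSep ≠ -1 := by omega
        have htokr : pvTok r = r.take (PySem.Chars.find r pvSep).toNat ::
            pvTok (r.drop ((PySem.Chars.find r pvSep).toNat + 2)) := by
          rw [pvTok, dif_neg hr1]
        have hslr : PySem.List.slice r (some (PySem.Chars.find r pvSep + 2)) =
            r.drop ((PySem.Chars.find r pvSep).toNat + 2) := by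
          rw [PySem.List.slice_from r (by omega : (0:Int) ≤ PySem.Chars.find r pvSep + 2)]
          congr 1
          omega
        have hlne : f ≠ [] := pvFind_nonneg_ne_nil f hfi
        have hlpos : 0 < f.length := List.length_pos_iff.mpr hlne
        set f' := f.drop ((PySem.Chars.find f pvSep).toNat + 2) with hf'
        set r' := r.drop ((PySem.Chars.find r pvSep).toNat + 2) with hr'
        have hlen' : f'.length < f.length := by
          simp only [hf', List.length_drop]; omega
        rw [hslf, hslr, ih f'.length (by omega) f' r' le_rfl]
        dsimp only
        set k' := pvPrefixLen ((pvTok f').zip (pvTok r')) with hk'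
        have htoke : (if PySem.Chars.find f pvSep < 0 then f
            else PySem.List.slice f none (some (PySem.Chars.find f pvSep))) =
            f.take (PySem.Chars.find f pvSep).toNat := by
          rw [if_neg hfi, hslice f hfi]
        have hk : pvPrefixLen ((pvTok f).zip (pvTok r)) = 1 + k' := by
          rw [htokf, htokr, List.zip_cons_cons]
          simp only [pvPrefixLen]
          rw [if_neg ?hc]
          case hc =>
            rw [htoke, if_neg hri, hslice r hri] at hne
            simpa using hne
        rw [hk, if_neg (by omega : ¬ (1 + k' = 0))]
        have htake : (pvTok f).take (1 + k') =
            f.take (PySem.Chars.find f pvSep).toNat :: (pvTok f').take k' := by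
          rw [htokf, Nat.add_comm 1 k', List.take_succ_cons]
        have hdrop : (pvTok f).drop (1 + k') = (pvTok f').drop k' := by
          rw [htokf, Nat.add_comm 1 k', List.drop_succ_cons]
        rw [htake, hdrop]
        by_cases hk0 : k' = 0
        · rw [if_pos hk0]
          dsimp only
          rw [Prod.mk.injEq]
          constructor
          · rw [htoke, hk0, List.take_zero, PySem.Chars.join_singleton]
          · rw [hk0]
        · rw [if_neg hk0]
          dsimp only
          rw [Prod.mk.injEq]
          rcases pvTok_cons f' with ⟨x, xs, hx⟩
          obtain ⟨m, hm⟩ : ∃ m, k' = m + 1 := ⟨k' - 1, by omega⟩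
          have hys : (pvTok f').take k' = x :: xs.take m := by
            rw [hx, hm, List.take_succ_cons]
          constructor
          · rw [hys, PySem.Chars.join_cons_cons, htoke]
          · rfl


-- == final assembly ==

theorem pvOfList_injective : Function.Injective String.ofList := by
  intro a b h
  have := congrArg String.toList h
  simpa using this

theorem pvSplitQ_eq (s : String) :
    (PySem.Str.split? s "__").getD [] = (pvTok s.toList).map String.ofList := by
  have hsep : "__".toList = pvSep := by decide
  have h : PySem.Str.split? s "__" =
      some ((PySem.Chars.splitOn s.toList pvSep).map String.ofList) := by
    simp [PySem.Str.split?, PySem.Chars.split?, hsep]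
    decide
  rw [h, Option.getD_some, pvSplitOn_eq_pvTok]

theorem pvStrJoin_map (X : List (List Char)) :
    PySem.Str.join "__" (X.map String.ofList) = String.ofList (PySem.Chars.join pvSep X) := by
  have hsep : "__".toList = pvSep := by decide
  simp [PySem.Str.join, hsep, List.map_map, Function.comp_def]

theorem pvOfList_toList (s : String) : String.ofList s.toList = s := by
  apply String.toList_inj.mp
  simp

theorem pvStrJoin_nil : PySem.Str.join "__" ([] : List String) = "" := by decide

-- ===== VERDICT (by name: the statement is the Claim_ definition above) =====
theorem splitCommon_spec : Claim_equal_splitCommon := by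
  intro f r _
  unfold Spec_splitCommon splitCommon splitCommon_alt
  dsimp only
  have hA := splitCommon_join_eq
    (if f ≠ "" then (PySem.Str.split? f "__").getD [] else [])
    (if r ≠ "" then (PySem.Str.split? r "__").getD [] else [])
  rw [Prod.mk.injEq] at hA
  rw [hA.1, hA.2]
  by_cases hf : f = ""
  · subst hf
    rw [if_pos (Or.inl rfl)]
    have hL : (if ("" : String) ≠ "" then (PySem.Str.split? "" "__").getD [] else []) = [] :=
      if_neg (by simp)
    rw [hL]
    rw [List.zip_nil_left]
    have hk0 : pvPrefixLen ([] : List (String × String)) = 0 := rfl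
    rw [hk0, List.take_nil, List.drop_nil, pvStrJoin_nil]
  · by_cases hr : r = ""
    · subst hr
      rw [if_pos (Or.inr rfl)]
      have hR : (if ("" : String) ≠ "" then (PySem.Str.split? "" "__").getD [] else []) = [] :=
        if_neg (by simp)
      rw [hR]
      have hL : (if f ≠ "" then (PySem.Str.split? f "__").getD [] else []) =
          (pvTok f.toList).map String.ofList := by
        rw [if_pos hf, pvSplitQ_eq]
      rw [hL, List.zip_nil_right]
      have hk0 : pvPrefixLen ([] : List (String × String)) = 0 := rfl
      rw [hk0, List.take_zero, List.drop_zero, pvStrJoin_nil, pvStrJoin_map,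
        pvJoin_pvTok f.toList.length f.toList le_rfl, pvOfList_toList]
    · rw [if_neg (show ¬(f = "" ∨ r = "") from fun h => h.elim (fun h1 => hf h1) (fun h2 => hr h2))]
      have hL : (if f ≠ "" then (PySem.Str.split? f "__").getD [] else []) =
          (pvTok f.toList).map String.ofList := by
        rw [if_pos hf, pvSplitQ_eq]
      have hR : (if r ≠ "" then (PySem.Str.split? r "__").getD [] else []) =
          (pvTok r.toList).map String.ofList := by
        rw [if_pos hr, pvSplitQ_eq]
      rw [hL, hR, pvPrefixLen_zip_map String.ofList pvOfList_injective]
      rw [pvGo_char f.toList.length f.toList r.toList le_rfl]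
      dsimp only
      by_cases hk : pvPrefixLen ((pvTok f.toList).zip (pvTok r.toList)) = 0
      · rw [hk]
        rw [if_pos rfl]
        dsimp only
        rw [Prod.mk.injEq]
        exact ⟨by rw [List.take_zero, pvStrJoin_nil],
               by rw [List.drop_zero, List.drop_zero, pvStrJoin_map]⟩
      · rw [if_neg hk]
        dsimp only
        rw [Prod.mk.injEq]
        exact ⟨by rw [← List.map_take, pvStrJoin_map],
               by rw [← List.map_drop, pvStrJoin_map]⟩
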